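-- pv_equiv track=rewrite | github.com/VCHSRobots/RobotCode2018 | Pathfinding/DotCompare.py | findLargestPointPerAngle
-- ===== SOURCE A (Python) =====
-- def findLargestPointPerAngle(anglepoints):
--     points = {}
--     for anglepoint in anglepoints:
--         if anglepoints[anglepoint][0] in points:
--             if anglepoint > points[anglepoints[anglepoint][0]]:
--                 points[anglepoints[anglepoint][0]] = anglepoint
--         else:
--             points[anglepoints[anglepoint][0]] = anglepoint
--     return points
-- ===== SOURCE B (Python) =====
-- def findLargestPointPerAngle(anglepoints):
--     # Pass 1: group the angle keys by their category (first element of the value list).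
--     index = {}
--     for anglepoint in anglepoints:
--         index.setdefault(anglepoints[anglepoint][0], []).append(anglepoint)
--     # Pass 2: reduce each group to its largest key.
--     return {cat: max(keys) for cat, keys in index.items()}
-- ===== Notes on version B (the rewrite author's own statement) =====
-- stated objective: alternative
-- what changed: Replaces the inline running-maximum with a two-phase decomposition: first pass groups the angle keys by category into an index dict (setdefault/append), second pass reduces each group with max in a dict comprehension.
import Mathlib
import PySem

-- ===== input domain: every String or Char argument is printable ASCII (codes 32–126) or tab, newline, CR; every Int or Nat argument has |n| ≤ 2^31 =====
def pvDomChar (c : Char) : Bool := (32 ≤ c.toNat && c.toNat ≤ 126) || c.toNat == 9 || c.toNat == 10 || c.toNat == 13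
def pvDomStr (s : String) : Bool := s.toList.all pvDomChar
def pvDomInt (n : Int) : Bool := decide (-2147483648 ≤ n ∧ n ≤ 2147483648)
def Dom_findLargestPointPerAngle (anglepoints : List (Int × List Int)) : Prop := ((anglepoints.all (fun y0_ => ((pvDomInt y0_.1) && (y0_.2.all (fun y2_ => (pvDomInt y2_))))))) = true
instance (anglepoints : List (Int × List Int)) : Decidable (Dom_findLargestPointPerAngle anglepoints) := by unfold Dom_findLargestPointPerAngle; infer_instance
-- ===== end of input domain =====

-- B replaces A's inline running-maximum dict with a two-phase decomposition (group keys by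
-- category, then reduce each group with max); same cost, alternative structure.


-- ===== PORT A =====
-- 'for anglepoint in anglepoints' iterates the dict's keys; 'anglepoints[anglepoint][0]'
-- is a dict lookup followed by list indexing (pyGet?; none = IndexError, excluded by Pre_).
def findLargestPointPerAngle (anglepoints : List (Int × List Int)) : List (Int × Int) :=
  (anglepoints.foldl (fun (points : PySem.Dict Int Int) anglepoint =>
      let cat : Int :=
        (PySem.List.pyGet? (((PySem.Dict.mk anglepoints).get? anglepoint.1).getD []) 0).getD 0
      if points.contains cat then
        if anglepoint.1 > points.getD cat 0 then points.insert cat anglepoint.1 else points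
      else
        points.insert cat anglepoint.1)
    PySem.Dict.empty).items

-- ===== PORT B =====
-- pass 1: index.setdefault(cat, []).append(k)  =  Dict.modify cat [] (· ++ [k]);
-- pass 2: dict comprehension over index.items with max(keys) = PySem.List.max?.
def findLargestPointPerAngle_alt (anglepoints : List (Int × List Int)) : List (Int × Int) :=
  let index : PySem.Dict Int (List Int) :=
    anglepoints.foldl (fun idx anglepoint =>
      let cat : Int :=
        (PySem.List.pyGet? (((PySem.Dict.mk anglepoints).get? anglepoint.1).getD []) 0).getD 0
      idx.modify cat [] (fun ks => ks ++ [anglepoint.1]))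
    PySem.Dict.empty
  index.items.map (fun p => (p.1, (PySem.List.max? p.2 (fun x => x)).getD 0))

-- ===== PRECONDITION & SPEC =====
-- Pre_ requires distinct keys (the argument is a Python dict, whose keys are necessarily
-- unique, so duplicate-key association lists represent no actual input) and every value
-- list nonempty (on an empty value list A raises IndexError at anglepoints[anglepoint][0]).
def Pre_findLargestPointPerAngle (anglepoints : List (Int × List Int)) : Prop :=
  (anglepoints.map Prod.fst).Nodup ∧ ∀ p ∈ anglepoints, p.2 ≠ []
instance (anglepoints : List (Int × List Int)) : Decidable (Pre_findLargestPointPerAngle anglepoints) := by unfold Pre_findLargestPointPerAngle; infer_instance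

def pvWitness_findLargestPointPerAngle : (List (Int × List Int)) := [(1, [5, 2]), (3, [5]), (2, [7, 1])]

def Spec_findLargestPointPerAngle (anglepoints : List (Int × List Int)) (out : List (Int × Int)) : Prop := out = findLargestPointPerAngle_alt anglepoints
instance (anglepoints : List (Int × List Int)) (out : List (Int × Int)) : Decidable (Spec_findLargestPointPerAngle anglepoints out) := by unfold Spec_findLargestPointPerAngle; infer_instance

-- ===== CLAIM (what is proved, stated in full; the proofs are below) =====
def Claim_equal_findLargestPointPerAngle : Prop := ∀ (anglepoints : List (Int × List Int)), Dom_findLargestPointPerAngle anglepoints → Pre_findLargestPointPerAngle anglepoints → Spec_findLargestPointPerAngle anglepoints (findLargestPointPerAngle anglepoints)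

-- ===== LEMMAS AND PROOFS =====

-- category of one entry, read directly from the entry's own value list
def pvCat (p : Int × List Int) : Int := (PySem.List.pyGet? p.2 0).getD 0

-- max of a group, as B's pass 2 computes it
def pvMaxD (ks : List Int) : Int := (PySem.List.max? ks (fun x => x)).getD 0

theorem pvMaxD_singleton (k : Int) : pvMaxD [k] = k := by
  simp [pvMaxD, PySem.List.max?_id_cons]

theorem pvMaxD_append (ks : List Int) (hks : ks ≠ []) (k : Int) :
    pvMaxD (ks ++ [k]) = max (pvMaxD ks) k := by
  cases ks with
  | nil => exact absurd rfl hks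
  | cons h t =>
    simp [pvMaxD, PySem.List.max?_id_cons, List.foldl_append]

-- the loop invariant: A's dict is B's index with each group reduced by pvMaxD
theorem pvStep (l : List (Int × List Int))
    (d : PySem.Dict Int Int) (idx : PySem.Dict Int (List Int))
    (hinv : d.items = idx.items.map (fun q => (q.1, pvMaxD q.2)))
    (hne : ∀ q ∈ idx.items, q.2 ≠ []) (hnd : idx.keys.Nodup) :
    (l.foldl (fun d p =>
        if d.contains (pvCat p) then
          if p.1 > d.getD (pvCat p) 0 then d.insert (pvCat p) p.1 else d
        else d.insert (pvCat p) p.1) d).items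
    = (l.foldl (fun idx p => idx.insert (pvCat p) (idx.getD (pvCat p) [] ++ [p.1])) idx).items.map
        (fun q => (q.1, pvMaxD q.2)) := by
  induction l generalizing d idx with
  | nil => exact hinv
  | cons p t ih =>
    simp only [List.foldl_cons]
    set c := pvCat p with hc
    set k := p.1 with hk
    have hkeys : d.keys = idx.keys := by
      simp only [PySem.Dict.keys, hinv, List.map_map]; rfl
    have hcont : d.contains c = idx.contains c := by
      rw [PySem.Dict.contains_eq_decide_mem_keys, PySem.Dict.contains_eq_decide_mem_keys, hkeys]
    by_cases hmemc : idx.contains c = true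
    · -- key c already present in the index
      have hsome : ∃ ks, idx.get? c = some ks := by
        rw [PySem.Dict.contains_eq_isSome_get?] at hmemc
        exact Option.isSome_iff_exists.mp hmemc
      obtain ⟨ks, hks⟩ := hsome
      have hmem : (c, ks) ∈ idx.items := PySem.Dict.mem_items_of_get?_eq_some idx hks
      have hgD : idx.getD c [] = ks := PySem.Dict.getD_of_get?_eq_some idx [] hks
      have ksne : ks ≠ [] := hne _ hmem
      have hdval : d.getD c 0 = pvMaxD ks := by
        have hdm : (c, pvMaxD ks) ∈ d.items := by
          rw [hinv]; exact List.mem_map.mpr ⟨(c, ks), hmem, rfl⟩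
        exact PySem.Dict.getD_of_mem_items d hdm (hkeys ▸ hnd) 0
      have huniq : ∀ q ∈ idx.items, q.1 = c → q.2 = ks := by
        intro q hq hq1
        have := PySem.Dict.get?_of_mem_items idx hq hnd
        rw [hq1, hks] at this
        exact (Option.some.injEq _ _).mp this.symm
      have hcontd : d.contains c = true := by rw [hcont]; exact hmemc
      have hitems' : (idx.insert c (idx.getD c [] ++ [k])).items
          = idx.items.map (fun q => if q.1 == c then (c, ks ++ [k]) else q) := by
        rw [hgD, PySem.Dict.items_insert_of_contains idx _ hmemc]
      have hne' : ∀ q ∈ (idx.insert c (idx.getD c [] ++ [k])).items, q.2 ≠ [] := by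
        intro q hq
        rw [hitems'] at hq
        obtain ⟨r, hr, hrq⟩ := List.mem_map.mp hq
        by_cases hrc : r.1 = c <;> simp [hrc] at hrq
        · simp [← hrq]
        · rw [← hrq]; exact hne _ hr
      have hnd' : (idx.insert c (idx.getD c [] ++ [k])).keys.Nodup :=
        PySem.Dict.nodup_keys_insert idx _ _ hnd
      by_cases hgt : k > d.getD c 0
      · simp only [hcontd, if_true, hgt]
        refine ih (d.insert c k) _ ?_ hne' hnd'
        rw [PySem.Dict.items_insert_of_contains d k hcontd, hitems', hinv,
            List.map_map, List.map_map]
        apply List.map_congr_left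
        intro q hq
        by_cases hqc : q.1 = c
        · have : pvMaxD (ks ++ [k]) = k := by
            rw [pvMaxD_append ks ksne k]
            rw [hdval] at hgt
            omega
          simp [Function.comp, hqc, this]
        · simp [Function.comp, hqc]
      · simp only [hcontd, if_true, hgt, if_false]
        refine ih d _ ?_ hne' hnd'
        rw [hitems', hinv, List.map_map]
        apply List.map_congr_left
        intro q hq
        by_cases hqc : q.1 = c
        · have hq2 : q.2 = ks := huniq q hq hqc
          have : pvMaxD (ks ++ [k]) = pvMaxD ks := by
            rw [pvMaxD_append ks ksne k]
            rw [hdval] at hgt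
            omega
          rw [hq2]
          simp [Function.comp, hqc, this.symm]
        · simp [Function.comp, hqc]
    · -- key c is new
      have hmemc' : idx.contains c = false := by simpa using hmemc
      have hcontd : d.contains c = false := by rw [hcont]; exact hmemc'
      have hgD : idx.getD c [] = [] := PySem.Dict.getD_of_not_contains idx [] hmemc'
      have hitems' : (idx.insert c (idx.getD c [] ++ [k])).items = idx.items ++ [(c, [k])] := by
        rw [hgD, List.nil_append, PySem.Dict.items_insert_of_not_contains idx [k] hmemc']
      have hne' : ∀ q ∈ (idx.insert c (idx.getD c [] ++ [k])).items, q.2 ≠ [] := by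
        intro q hq
        rw [hitems'] at hq
        rcases List.mem_append.mp hq with h | h
        · exact hne _ h
        · simp at h; simp [h]
      have hnd' : (idx.insert c (idx.getD c [] ++ [k])).keys.Nodup :=
        PySem.Dict.nodup_keys_insert idx _ _ hnd
      simp only [hcontd, if_false, Bool.false_eq_true]
      refine ih (d.insert c k) _ ?_ hne' hnd'
      rw [PySem.Dict.items_insert_of_not_contains d k hcontd, hitems', hinv,
          List.map_append]
      simp [pvMaxD_singleton]

-- ===== VERDICT (by name: the statement is the Claim_ definition above) =====
theorem findLargestPointPerAngle_spec : Claim_equal_findLargestPointPerAngle := by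
  intro aps _hdom hpre
  unfold Spec_findLargestPointPerAngle findLargestPointPerAngle findLargestPointPerAngle_alt
  obtain ⟨hnd, hne⟩ := hpre
  -- under Nodup keys the whole-dict lookup of an entry's key is that entry's value
  have hlook : ∀ p ∈ aps,
      (PySem.List.pyGet? (((PySem.Dict.mk aps).get? p.1).getD []) 0).getD 0 = pvCat p := by
    intro p hp
    have : (PySem.Dict.mk aps).get? p.1 = some p.2 :=
      PySem.Dict.get?_of_mem_items (PySem.Dict.mk aps) hp hnd
    simp [this, pvCat]
  rw [PySem.List.foldl_congr_mem aps _
        (fun d p =>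
          if d.contains (pvCat p) then
            if p.1 > d.getD (pvCat p) 0 then d.insert (pvCat p) p.1 else d
          else d.insert (pvCat p) p.1) PySem.Dict.empty
        (by intro acc p hp; simp only [hlook p hp]),
      PySem.List.foldl_congr_mem aps _
        (fun idx p => idx.insert (pvCat p) (idx.getD (pvCat p) [] ++ [p.1])) PySem.Dict.empty
        (by intro acc p hp; simp only [hlook p hp]; rfl)]
  exact pvStep aps PySem.Dict.empty PySem.Dict.empty rfl (by simp [PySem.Dict.empty]) (by simp [PySem.Dict.empty])
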